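-- pv_equiv track=rewrite | github.com/Oichkatzelesfrettschen/openperception | tools/gen_mono_tokens.py | snap_to_ramp
-- ===== SOURCE A (Python) =====
-- GRAY_RAMP = [
--     (17, "#111827"),  # 900
--     (31, "#1F2937"),  # 800
--     (55, "#374151"),  # 700
--     (107, "#6B7280"),  # 500
--     (156, "#9CA3AF"),  # 400
--     (209, "#D1D5DB"),  # 300
--     (229, "#E5E7EB"),  # 200
--     (243, "#F3F4F6"),  # 100
--     (255, "#FFFFFF"),  # 0
-- ]
--
-- def snap_to_ramp(gray8: int) -> str:
--     """Return the hex string of the nearest gray ramp stop."""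
--     best_hex = GRAY_RAMP[0][1]
--     best_dist = abs(gray8 - GRAY_RAMP[0][0])
--     for stop_val, stop_hex in GRAY_RAMP[1:]:
--         dist = abs(gray8 - stop_val)
--         if dist < best_dist:
--             best_dist = dist
--             best_hex = stop_hex
--     return best_hex
-- ===== SOURCE B (Python) =====
-- GRAY_RAMP = [
--     (17, "#111827"),
--     (31, "#1F2937"),
--     (55, "#374151"),
--     (107, "#6B7280"),
--     (156, "#9CA3AF"),
--     (209, "#D1D5DB"),
--     (229, "#E5E7EB"),
--     (243, "#F3F4F6"),
--     (255, "#FFFFFF"),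
-- ]
--
-- def snap_to_ramp(gray8: int) -> str:
--     """Return the hex string of the nearest gray ramp stop (binary search)."""
--     # hand-written bisect_left over the sorted stop values
--     lo, hi = 0, len(GRAY_RAMP)
--     while lo < hi:
--         mid = (lo + hi) // 2
--         if GRAY_RAMP[mid][0] < gray8:
--             lo = mid + 1
--         else:
--             hi = mid
--     if lo == 0:
--         return GRAY_RAMP[0][1]
--     if lo == len(GRAY_RAMP):
--         return GRAY_RAMP[-1][1]
--     before = GRAY_RAMP[lo - 1]
--     after = GRAY_RAMP[lo]
--     if gray8 - before[0] <= after[0] - gray8: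
--         return before[1]
--     return after[1]
-- ===== Notes on version B (the rewrite author's own statement) =====
-- stated objective: alternative
-- what changed: Replaces the full linear scan over all ramp stops with a hand-written bisect_left binary search on the sorted stop values followed by a constant-time comparison of the two bracketing stops (tie toward the lower stop).
import Mathlib
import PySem

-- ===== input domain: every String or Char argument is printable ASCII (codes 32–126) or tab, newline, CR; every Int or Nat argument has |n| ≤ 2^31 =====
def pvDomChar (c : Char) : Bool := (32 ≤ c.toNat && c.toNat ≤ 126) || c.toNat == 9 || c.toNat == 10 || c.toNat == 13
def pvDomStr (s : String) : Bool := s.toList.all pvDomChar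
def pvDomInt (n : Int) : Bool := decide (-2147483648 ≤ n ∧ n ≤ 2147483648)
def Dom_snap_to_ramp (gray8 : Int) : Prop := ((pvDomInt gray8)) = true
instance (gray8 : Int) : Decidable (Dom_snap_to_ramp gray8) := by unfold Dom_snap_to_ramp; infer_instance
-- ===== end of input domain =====

-- B replaces A's full linear scan over the ramp with a bisect_left binary search plus a two-neighbour comparison (alternative decomposition, same result).

-- ===== PORT A =====
def grayRamp : List (Int × String) :=
  [(17, "#111827"), (31, "#1F2937"), (55, "#374151"), (107, "#6B7280"),
   (156, "#9CA3AF"), (209, "#D1D5DB"), (229, "#E5E7EB"), (243, "#F3F4F6"),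
   (255, "#FFFFFF")]

-- literal port of A: seed with GRAY_RAMP[0], fold over GRAY_RAMP[1:] keeping (best_dist, best_hex)
def snap_to_ramp (gray8 : Int) : String :=
  let first := grayRamp.headD (0, "")
  let best := (grayRamp.drop 1).foldl
    (fun (st : Nat × String) stop =>
      let dist := (gray8 - stop.1).natAbs
      if dist < st.1 then (dist, stop.2) else st)
    ((gray8 - first.1).natAbs, first.2)
  best.2

-- ===== PORT B =====
-- Source B's hand-written bisect_left while-loop; the fuel argument (= list length ≥ number of
-- iterations, since hi - lo strictly shrinks each turn) only makes the loop structural.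
def bisectLeftRamp (gray8 : Int) : Nat → Nat → Nat → Nat
  | 0, lo, _ => lo
  | fuel + 1, lo, hi =>
    if lo < hi then
      let mid := (lo + hi) / 2
      if (grayRamp.getD mid (0, "")).1 < gray8 then bisectLeftRamp gray8 fuel (mid + 1) hi
      else bisectLeftRamp gray8 fuel lo mid
    else lo

def snap_to_ramp_alt (gray8 : Int) : String :=
  let lo := bisectLeftRamp gray8 grayRamp.length 0 grayRamp.length
  if lo = 0 then (grayRamp.headD (0, "")).2
  else if lo = grayRamp.length then (grayRamp.getLastD (0, "")).2
  else
    let before := grayRamp.getD (lo - 1) (0, "")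
    let after := grayRamp.getD lo (0, "")
    if gray8 - before.1 ≤ after.1 - gray8 then before.2 else after.2

-- ===== PRECONDITION & SPEC =====
def Spec_snap_to_ramp (gray8 : Int) (out : String) : Prop := out = snap_to_ramp_alt gray8
instance (gray8 : Int) (out : String) : Decidable (Spec_snap_to_ramp gray8 out) := by unfold Spec_snap_to_ramp; infer_instance

-- ===== CLAIM (what is proved, stated in full; the proofs are below) =====
def Claim_equal_snap_to_ramp : Prop := ∀ (gray8 : Int), Dom_snap_to_ramp gray8 → Spec_snap_to_ramp gray8 (snap_to_ramp gray8)

-- ===== LEMMAS AND PROOFS =====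

-- below the lowest stop, A's scan never improves on the first stop
theorem a_low (g : Int) (h2 : g ≤ 16) : snap_to_ramp g = "#111827" := by
  unfold snap_to_ramp
  simp only [grayRamp, List.headD, List.drop, List.foldl]
  rw [if_neg (show ¬((g-31).natAbs < (g-17).natAbs) by omega)]
  rw [if_neg (show ¬((g-55).natAbs < (g-17).natAbs) by omega)]
  rw [if_neg (show ¬((g-107).natAbs < (g-17).natAbs) by omega)]
  rw [if_neg (show ¬((g-156).natAbs < (g-17).natAbs) by omega)]
  rw [if_neg (show ¬((g-209).natAbs < (g-17).natAbs) by omega)]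
  rw [if_neg (show ¬((g-229).natAbs < (g-17).natAbs) by omega)]
  rw [if_neg (show ¬((g-243).natAbs < (g-17).natAbs) by omega)]
  rw [if_neg (show ¬((g-255).natAbs < (g-17).natAbs) by omega)]

-- above the highest stop, every step of A's scan improves, ending at the last stop
theorem a_high (g : Int) (h2 : 256 ≤ g) : snap_to_ramp g = "#FFFFFF" := by
  unfold snap_to_ramp
  simp only [grayRamp, List.headD, List.drop, List.foldl]
  rw [if_pos (show ((g-31).natAbs < (g-17).natAbs) by omega)]
  rw [if_pos (show ((g-55).natAbs < (g-31).natAbs) by omega)]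
  rw [if_pos (show ((g-107).natAbs < (g-55).natAbs) by omega)]
  rw [if_pos (show ((g-156).natAbs < (g-107).natAbs) by omega)]
  rw [if_pos (show ((g-209).natAbs < (g-156).natAbs) by omega)]
  rw [if_pos (show ((g-229).natAbs < (g-209).natAbs) by omega)]
  rw [if_pos (show ((g-243).natAbs < (g-229).natAbs) by omega)]
  rw [if_pos (show ((g-255).natAbs < (g-243).natAbs) by omega)]

theorem bisect_low (g : Int) (h2 : g ≤ 16) : bisectLeftRamp g 9 0 9 = 0 := by
  unfold bisectLeftRamp; norm_num [grayRamp]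
  rw [if_neg (show ¬((156:Int) < g) by omega)]
  unfold bisectLeftRamp; norm_num [grayRamp]
  rw [if_neg (show ¬((55:Int) < g) by omega)]
  unfold bisectLeftRamp; norm_num [grayRamp]
  rw [if_neg (show ¬((31:Int) < g) by omega)]
  unfold bisectLeftRamp; norm_num [grayRamp]
  rw [if_neg (show ¬((17:Int) < g) by omega)]
  unfold bisectLeftRamp; norm_num

theorem bisect_high (g : Int) (h2 : 256 ≤ g) : bisectLeftRamp g 9 0 9 = 9 := by
  unfold bisectLeftRamp; norm_num [grayRamp]
  rw [if_pos (show ((156:Int) < g) by omega)]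
  unfold bisectLeftRamp; norm_num [grayRamp]
  rw [if_pos (show ((243:Int) < g) by omega)]
  unfold bisectLeftRamp; norm_num [grayRamp]
  rw [if_pos (show ((255:Int) < g) by omega)]
  unfold bisectLeftRamp; norm_num

theorem alt_low (g : Int) (h2 : g ≤ 16) : snap_to_ramp_alt g = "#111827" := by
  unfold snap_to_ramp_alt
  simp only [grayRamp, List.length]
  rw [show bisectLeftRamp g 9 0 9 = 0 from bisect_low g h2]
  norm_num [grayRamp]

theorem alt_high (g : Int) (h2 : 256 ≤ g) : snap_to_ramp_alt g = "#FFFFFF" := by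
  unfold snap_to_ramp_alt
  simp only [grayRamp, List.length]
  rw [show bisectLeftRamp g 9 0 9 = 9 from bisect_high g h2]
  norm_num [grayRamp]

set_option maxHeartbeats 4000000 in
theorem mid_eq (g : Int) (h1 : 17 ≤ g) (h2 : g ≤ 255) : snap_to_ramp g = snap_to_ramp_alt g := by
  interval_cases g <;> decide

-- ===== VERDICT (by name: the statement is the Claim_ definition above) =====
theorem snap_to_ramp_spec : Claim_equal_snap_to_ramp := by
  intro g _
  unfold Spec_snap_to_ramp
  by_cases hlo : g ≤ 16
  · rw [a_low g hlo, alt_low g hlo]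
  · by_cases hhi : 256 ≤ g
    · rw [a_high g hhi, alt_high g hhi]
    · exact mid_eq g (by omega) (by omega)
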